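-- pv_equiv track=rewrite | github.com/pathwaycom/pathway | python/pathway/tests/test_persistence_iterate.py | _compute_chunk_assignments
-- ===== SOURCE A (Python) =====
-- def _compute_chunk_assignments(events: dict) -> dict:
--     """Compute chunk_start for each event given the full event state.
--
--     Args:
--         events: dict of event_id → (event_time, flag, data)
--
--     Returns:
--         dict of event_time → chunk_start (int or None)
--     """
--     sorted_events = sorted(events.values(), key=lambda e: e[0])
--     assignments = {}
--     current_chunk = None
--     for event_time, flag, _data in sorted_events:
--         if flag:
--             current_chunk = event_time
--         assignments[event_time] = current_chunk
--     return assignments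
-- ===== SOURCE B (Python) =====
-- def _compute_chunk_assignments(events: dict) -> dict:
--     """Compute chunk_start for each event given the full event state.
--
--     Index-then-lookup: collect the flagged times once, then map each
--     distinct event time t independently to the latest flagged time <= t.
--     """
--     flagged = [e[0] for e in events.values() if e[1]]
--     return {
--         t: max((s for s in flagged if s <= t), default=None)
--         for t in sorted({e[0] for e in events.values()})
--     }
-- ===== Notes on version B (the rewrite author's own statement) =====
-- stated objective: alternative
-- what changed: replaces the single stateful scan over the time-sorted events (carrying current_chunk) with an index-then-lookup pass: collect the flagged times once, then map each distinct event time t independently to max(flagged s <= t), default None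
import Mathlib
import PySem

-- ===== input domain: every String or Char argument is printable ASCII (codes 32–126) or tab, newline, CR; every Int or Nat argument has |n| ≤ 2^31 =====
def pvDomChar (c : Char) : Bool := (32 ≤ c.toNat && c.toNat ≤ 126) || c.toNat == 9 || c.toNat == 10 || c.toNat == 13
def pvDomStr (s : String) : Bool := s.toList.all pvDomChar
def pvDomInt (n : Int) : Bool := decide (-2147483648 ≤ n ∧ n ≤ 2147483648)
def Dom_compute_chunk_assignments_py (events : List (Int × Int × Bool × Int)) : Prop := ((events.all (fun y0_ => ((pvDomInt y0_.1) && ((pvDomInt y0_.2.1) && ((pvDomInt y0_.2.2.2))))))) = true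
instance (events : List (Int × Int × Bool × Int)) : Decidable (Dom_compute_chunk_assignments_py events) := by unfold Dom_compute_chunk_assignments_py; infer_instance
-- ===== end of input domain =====

-- B (index-then-lookup over distinct times) returns the same dict as A's stateful sorted scan; proved equal on all inputs.
-- ===== PORT A =====
def compute_chunk_assignments_py (events : List (Int × Int × Bool × Int)) : List (Int × Option Int) :=
  let sorted_events := PySem.List.sorted (events.map (fun p => p.2)) (fun e => e.1) false
  (sorted_events.foldl
    (fun (st : PySem.Dict Int (Option Int) × Option Int) e =>
      let cur := if e.2.1 then some e.1 else st.2
      (st.1.insert e.1 cur, cur))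
    (PySem.Dict.empty, none)).1.items

-- ===== PORT B =====
def compute_chunk_assignments_py_alt (events : List (Int × Int × Bool × Int)) : List (Int × Option Int) :=
  let vals := events.map (fun p => p.2)
  let flagged := (vals.filter (fun e => e.2.1)).map (fun e => e.1)
  ((PySem.List.sorted (PySem.Set.ofList (vals.map (fun e => e.1))) (fun x => x) false).foldl
    (fun (d : PySem.Dict Int (Option Int)) t =>
      d.insert t (PySem.List.max? (flagged.filter (fun s => s ≤ t)) (fun x => x)))
    PySem.Dict.empty).items

-- ===== PRECONDITION & SPEC =====
def Spec_compute_chunk_assignments_py (events : List (Int × Int × Bool × Int)) (out : List (Int × Option Int)) : Prop := out = compute_chunk_assignments_py_alt events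
instance (events : List (Int × Int × Bool × Int)) (out : List (Int × Option Int)) : Decidable (Spec_compute_chunk_assignments_py events out) := by unfold Spec_compute_chunk_assignments_py; infer_instance

-- ===== CLAIM (what is proved, stated in full; the proofs are below) =====
def Claim_equal_compute_chunk_assignments_py : Prop := ∀ (events : List (Int × Int × Bool × Int)), Dom_compute_chunk_assignments_py events → Spec_compute_chunk_assignments_py events (compute_chunk_assignments_py events)

-- ===== LEMMAS AND PROOFS =====

-- flagged times of a value list
def pvFT (l : List (Int × Bool × Int)) : List Int := (l.filter (fun e => e.2.1)).map (fun e => e.1)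
-- the value B assigns to time t, relative to a value list
def pvMX (l : List (Int × Bool × Int)) (t : Int) : Option Int :=
  PySem.List.max? ((pvFT l).filter (fun s => s ≤ t)) (fun x => x)

theorem pvOfList_append_singleton (xs : List Int) (x : Int) :
    PySem.Set.ofList (xs ++ [x]) =
      if x ∈ xs then PySem.Set.ofList xs else PySem.Set.ofList xs ++ [x] := by
  have h1 : PySem.Set.ofList (xs ++ [x]) = PySem.Set.add (PySem.Set.ofList xs) x := by
    simp [PySem.Set.ofList, List.foldl_append]
  have h2 : (PySem.Set.ofList xs).contains x = decide (x ∈ xs) := by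
    simp [PySem.Set.mem_ofList]
  rw [h1, PySem.Set.add, h2]
  by_cases hx : x ∈ xs <;> simp [hx]

theorem pvOfList_sublist (xs : List Int) : (PySem.Set.ofList xs).Sublist xs := by
  induction xs using List.reverseRecOn with
  | nil => simp [PySem.Set.ofList, PySem.Set.empty]
  | append_singleton l e ih =>
    rw [pvOfList_append_singleton]
    by_cases he : e ∈ l
    · simpa [he] using ih.trans (List.sublist_append_left l [e])
    · simpa [he] using List.Sublist.append ih (List.Sublist.refl [e])

theorem pvMax?_append_singleton_le (xs : List Int) (a : Int) (h : ∀ y ∈ xs, y ≤ a) :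
    PySem.List.max? (xs ++ [a]) (fun x => x) = some a := by
  cases hm : PySem.List.max? xs (fun x => x) with
  | none =>
    have hxs : xs = [] := (PySem.List.max?_eq_none_iff xs _).mp hm
    subst hxs
    simp [PySem.List.max?]
  | some m =>
    have hmem := PySem.List.max?_mem hm
    have hma : m ≤ a := h m hmem
    unfold PySem.List.max? at hm ⊢
    rw [List.foldl_append, hm]
    simp only [List.foldl_cons, List.foldl_nil]
    by_cases hlt : m < a
    · simp [hlt]
    · simp [hlt]; omega

theorem pvMax?_perm (xs ys : List Int) (hp : xs.Perm ys) :
    PySem.List.max? xs (fun x => x) = PySem.List.max? ys (fun x => x) := by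
  cases hx : PySem.List.max? xs (fun x => x) with
  | none =>
    have : xs = [] := (PySem.List.max?_eq_none_iff xs _).mp hx
    subst this
    have : ys = [] := hp.nil_eq.symm ▸ rfl
    simp [this, PySem.List.max?]
  | some m =>
    cases hy : PySem.List.max? ys (fun x => x) with
    | none =>
      have : ys = [] := (PySem.List.max?_eq_none_iff ys _).mp hy
      subst this
      have : xs = [] := hp.eq_nil
      simp [this, PySem.List.max?] at hx
    | some m' =>
      have h1 : m ≤ m' := PySem.List.max?_isMax hy m (hp.mem_iff.mp (PySem.List.max?_mem hx))
      have h2 : m' ≤ m := PySem.List.max?_isMax hx m' (hp.mem_iff.mpr (PySem.List.max?_mem hy))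
      have : m = m' := le_antisymm h1 h2
      simp [this]

theorem pvFT_append_singleton (l : List (Int × Bool × Int)) (e : Int × Bool × Int) :
    pvFT (l ++ [e]) = pvFT l ++ (if e.2.1 then [e.1] else []) := by
  by_cases hf : e.2.1 <;> simp [pvFT, List.filter_append, hf]

theorem pvMX_append_lt (l : List (Int × Bool × Int)) (e : Int × Bool × Int) (t : Int)
    (ht : t < e.1) : pvMX (l ++ [e]) t = pvMX l t := by
  unfold pvMX
  rw [pvFT_append_singleton]
  have hne : ¬ (e.1 ≤ t) := by omega
  by_cases hf : e.2.1 <;> simp [hf, List.filter_append, hne]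

theorem pvMX_last (l : List (Int × Bool × Int)) (e : Int × Bool × Int)
    (h : ∀ a ∈ l, a.1 ≤ e.1) :
    pvMX (l ++ [e]) e.1 =
      (if e.2.1 then some e.1 else PySem.List.max? (pvFT l) (fun x => x)) := by
  have hall : ∀ y ∈ pvFT l, y ≤ e.1 := by
    intro y hy
    simp only [pvFT, List.mem_map, List.mem_filter] at hy
    obtain ⟨a, ⟨ha, _⟩, rfl⟩ := hy
    exact h a ha
  have hfe : (pvFT l).filter (fun s => s ≤ e.1) = pvFT l :=
    List.filter_eq_self.mpr (fun y hy => by simpa using hall y hy)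
  unfold pvMX
  rw [pvFT_append_singleton]
  by_cases hf : e.2.1
  · have : (pvFT l ++ [e.1]).filter (fun s => s ≤ e.1) = pvFT l ++ [e.1] := by
      rw [List.filter_append, hfe]; simp
    rw [if_pos hf, this, pvMax?_append_singleton_le _ _ hall, if_pos hf]
  · rw [if_neg hf, if_neg hf]
    simp [hfe]

theorem pvA_invariant (l : List (Int × Bool × Int)) (h : l.Pairwise (fun a b => a.1 ≤ b.1)) :
    (l.foldl
      (fun (st : PySem.Dict Int (Option Int) × Option Int) e =>
        let cur := if e.2.1 then some e.1 else st.2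
        (st.1.insert e.1 cur, cur))
      (PySem.Dict.empty, none))
    = (PySem.Dict.mk ((PySem.List.dedup (l.map (fun e => e.1))).map (fun t => (t, pvMX l t))),
       PySem.List.max? (pvFT l) (fun x => x)) := by
  induction l using List.reverseRecOn with
  | nil =>
    simp [PySem.Dict.empty, PySem.List.dedup, PySem.Set.ofList, PySem.Set.empty, pvFT,
      PySem.List.max?]
  | append_singleton l e ih =>
    have hpair : l.Pairwise (fun a b => a.1 ≤ b.1) := (List.pairwise_append.mp h).1
    have hle : ∀ a ∈ l, a.1 ≤ e.1 := by
      intro a ha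
      exact (List.pairwise_append.mp h).2.2 a ha e (List.mem_singleton_self e)
    rw [List.foldl_append, ih hpair]
    have hcur : (if e.2.1 then some e.1 else PySem.List.max? (pvFT l) (fun x => x)) =
        PySem.List.max? (pvFT (l ++ [e])) (fun x => x) := by
      rw [pvFT_append_singleton]
      by_cases hf : e.2.1
      · rw [if_pos hf, if_pos hf,
          pvMax?_append_singleton_le _ _ (by
            intro y hy
            simp only [pvFT, List.mem_map, List.mem_filter] at hy
            obtain ⟨a, ⟨ha, _⟩, rfl⟩ := hy
            exact hle a ha)]
      · simp [hf]
    have hkeys : (PySem.Dict.mk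
        ((PySem.List.dedup (l.map (fun e => e.1))).map (fun t => (t, pvMX l t)))).keys
        = PySem.List.dedup (l.map (fun e => e.1)) := by
      simp [PySem.Dict.keys_mk, List.map_map, Function.comp_def]
    simp only [List.foldl_cons, List.foldl_nil]
    rw [hcur]
    refine Prod.ext ?_ rfl
    simp only []
    -- dict component
    apply PySem.Dict.ext
    by_cases hmem : e.1 ∈ l.map (fun e => e.1)
    · have hcont : (PySem.Dict.mk
          ((PySem.List.dedup (l.map (fun e => e.1))).map (fun t => (t, pvMX l t)))).contains e.1
          = true := by
        rw [PySem.Dict.contains_eq_decide_mem_keys, hkeys]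
        simp [PySem.List.dedup, PySem.Set.mem_ofList, hmem]
      rw [PySem.Dict.items_insert_of_contains _ _ hcont]
      have hded : PySem.List.dedup ((l ++ [e]).map (fun e => e.1))
          = PySem.List.dedup (l.map (fun e => e.1)) := by
        simp only [List.map_append, List.map_cons, List.map_nil, PySem.List.dedup]
        rw [pvOfList_append_singleton]
        simp [hmem]
      simp only [hded, List.map_map]
      apply List.map_congr_left
      intro t htmem
      have htl : t ∈ l.map (fun e => e.1) := by
        have := (PySem.Set.mem_ofList (l.map (fun e => e.1)) t).mp
        exact this (by simpa [PySem.List.dedup] using htmem)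
      have htle : t ≤ e.1 := by
        obtain ⟨a, ha, rfl⟩ := List.mem_map.mp htl
        exact hle a ha
      by_cases hte : t = e.1
      · subst hte
        simp only [Function.comp_def, beq_self_eq_true, if_true]
        rw [pvMX_last l e hle, hcur]
      · have htlt : t < e.1 := lt_of_le_of_ne htle hte
        have : (t == e.1) = false := by simp [hte]
        simp [pvMX_append_lt l e t htlt]
        exact fun hh => absurd hh hte
    · have hcont : (PySem.Dict.mk
          ((PySem.List.dedup (l.map (fun e => e.1))).map (fun t => (t, pvMX l t)))).contains e.1
          = false := by
        rw [PySem.Dict.contains_eq_decide_mem_keys, hkeys]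
        simp [PySem.List.dedup, PySem.Set.mem_ofList, hmem]
      rw [PySem.Dict.items_insert_of_not_contains _ _ hcont]
      have hded : PySem.List.dedup ((l ++ [e]).map (fun e => e.1))
          = PySem.List.dedup (l.map (fun e => e.1)) ++ [e.1] := by
        simp only [List.map_append, List.map_cons, List.map_nil, PySem.List.dedup]
        rw [pvOfList_append_singleton]
        simp [hmem]
      simp only [hded]
      rw [List.map_append]
      congr 1
      · apply List.map_congr_left
        intro t htmem
        have htl : t ∈ l.map (fun e => e.1) := by
          have := (PySem.Set.mem_ofList (l.map (fun e => e.1)) t).mp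
          exact this (by simpa [PySem.List.dedup] using htmem)
        have htle : t ≤ e.1 := by
          obtain ⟨a, ha, rfl⟩ := List.mem_map.mp htl
          exact hle a ha
        have hte : t ≠ e.1 := fun hh => hmem (hh ▸ htl)
        rw [pvMX_append_lt l e t (lt_of_le_of_ne htle hte)]
      · simp only [List.map_cons, List.map_nil]
        rw [pvMX_last l e hle, hcur]

-- ===== VERDICT (by name: the statement is the Claim_ definition above) =====
theorem compute_chunk_assignments_py_spec : Claim_equal_compute_chunk_assignments_py := by
  intro events _
  unfold Spec_compute_chunk_assignments_py compute_chunk_assignments_py compute_chunk_assignments_py_alt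
  simp only []
  set vals := events.map (fun p => p.2) with hvals
  set s := PySem.List.sorted vals (fun e => e.1) false with hs
  have hperm : s.Perm vals := PySem.List.sorted_perm vals (fun e => e.1) false
  have hpair : s.Pairwise (fun a b => a.1 ≤ b.1) := PySem.List.sorted_pairwise vals (fun e => e.1)
  rw [pvA_invariant s hpair]
  -- B side: fresh distinct keys appended to empty
  set T := PySem.List.sorted (PySem.Set.ofList (vals.map (fun e => e.1))) (fun x => x) false
    with hT
  have hTnodup : T.Nodup :=
    (PySem.List.sorted_perm _ _ _).nodup_iff.mpr (PySem.Set.nodup_ofList _)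
  have hB : ((T.foldl
      (fun (d : PySem.Dict Int (Option Int)) t =>
        d.insert t (PySem.List.max? (((vals.filter (fun e => e.2.1)).map (fun e => e.1)).filter
          (fun x => x ≤ t)) (fun x => x)))
      PySem.Dict.empty)).items
      = T.map (fun t => (t, PySem.List.max? (((vals.filter (fun e => e.2.1)).map
          (fun e => e.1)).filter (fun x => x ≤ t)) (fun x => x))) := by
    have := PySem.Dict.items_foldl_insert_fresh T (fun t => t)
      (fun t => PySem.List.max? (((vals.filter (fun e => e.2.1)).map (fun e => e.1)).filter
        (fun x => x ≤ t)) (fun x => x)) PySem.Dict.empty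
      (fun a _ => by simp [PySem.Dict.contains_empty]) (by simpa using hTnodup)
    simpa [PySem.Dict.empty] using this
  rw [hB]
  -- the two item lists coincide
  have hkeyeq : PySem.List.dedup (s.map (fun e => e.1)) = T := by
    have hmemiff : ∀ a : Int, a ∈ PySem.List.dedup (s.map (fun e => e.1)) ↔
        a ∈ PySem.Set.ofList (vals.map (fun e => e.1)) := by
      intro a
      rw [PySem.List.dedup, PySem.Set.mem_ofList, PySem.Set.mem_ofList,
        (hperm.map (fun e => e.1)).mem_iff]
    have hp : (PySem.List.dedup (s.map (fun e => e.1))).Perm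
        (PySem.Set.ofList (vals.map (fun e => e.1))) := by
      rw [List.perm_ext_iff_of_nodup (by rw [PySem.List.dedup]; exact PySem.Set.nodup_ofList _)
        (PySem.Set.nodup_ofList _)]
      exact hmemiff
    have hlt : (PySem.List.dedup (s.map (fun e => e.1))).Pairwise (· < ·) := by
      have hsub : (PySem.List.dedup (s.map (fun e => e.1))).Sublist (s.map (fun e => e.1)) := by
        rw [PySem.List.dedup]; exact pvOfList_sublist _
      have hle2 : (PySem.List.dedup (s.map (fun e => e.1))).Pairwise (· ≤ ·) :=
        (PySem.List.sorted_map_key_pairwise vals (fun e => e.1)).sublist hsub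
      have hnd : (PySem.List.dedup (s.map (fun e => e.1))).Nodup := by
        rw [PySem.List.dedup]; exact PySem.Set.nodup_ofList _
      exact (hle2.and hnd).imp (fun hab => lt_of_le_of_ne hab.1 hab.2)
    exact (PySem.List.sorted_eq_of_perm_of_pairwise_lt _ _ _ hp hlt).symm
  rw [hkeyeq]
  apply List.map_congr_left
  intro t _
  congr 1
  unfold pvMX pvFT
  apply pvMax?_perm
  exact (((hperm.filter _).map _).filter _)
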